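-- pv_equiv track=rewrite | github.com/ArthurSargsyanA/python_data_science | ex7.py | foo
-- ===== SOURCE A (Python) =====
-- def foo(arr) :
--     res = []
--     k = 0
--     for i in arr:
--         res.append(i ** 2)
--         k += 1
--     res.sort()
--     return res
-- ===== SOURCE B (Python) =====
-- def foo(arr):
--     return [x ** 2 for x in sorted(arr, key=abs)]
-- ===== Notes on version B (the rewrite author's own statement) =====
-- stated objective: idiomatic
-- what changed: B sorts the input by absolute value first and then squares in one comprehension (squaring is monotone in |x|), instead of squaring into an accumulator list and sorting the squares afterwards.
import Mathlib
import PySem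

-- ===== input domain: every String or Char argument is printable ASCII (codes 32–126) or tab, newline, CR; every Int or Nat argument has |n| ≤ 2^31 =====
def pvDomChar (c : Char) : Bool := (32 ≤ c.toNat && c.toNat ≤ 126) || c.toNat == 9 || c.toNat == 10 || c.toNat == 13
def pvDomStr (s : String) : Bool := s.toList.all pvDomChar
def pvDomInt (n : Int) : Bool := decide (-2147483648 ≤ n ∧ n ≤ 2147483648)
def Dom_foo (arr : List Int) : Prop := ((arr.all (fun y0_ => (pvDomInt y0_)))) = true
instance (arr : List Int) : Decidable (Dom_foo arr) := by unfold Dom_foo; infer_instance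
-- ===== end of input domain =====

-- B sorts the input by |x| first and then squares (sort-then-map), instead of A's square-then-sort; same values, more idiomatic.

-- ===== PORT A =====
-- A: build res by appending i ** 2 for each i (k is a dead counter), then res.sort().
def foo (arr : List Int) : List Int :=
  let res := arr.foldl (fun res i => res ++ [i ^ 2]) []
  PySem.List.sorted res (fun x => x) false

-- ===== PORT B =====
-- B: [x ** 2 for x in sorted(arr, key=abs)]
def foo_alt (arr : List Int) : List Int :=
  (PySem.List.sorted arr (fun x => |x|) false).map (fun x => x ^ 2)

-- ===== PRECONDITION & SPEC =====
def Spec_foo (arr : List Int) (out : List Int) : Prop := out = foo_alt arr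
instance (arr : List Int) (out : List Int) : Decidable (Spec_foo arr out) := by unfold Spec_foo; infer_instance

-- ===== CLAIM (what is proved, stated in full; the proofs are below) =====
def Claim_equal_foo : Prop := ∀ (arr : List Int), Dom_foo arr → Spec_foo arr (foo arr)

-- ===== LEMMAS AND PROOFS =====

theorem pv_foldl_append_sq (arr : List Int) (acc : List Int) :
    arr.foldl (fun res i => res ++ [i ^ 2]) acc = acc ++ arr.map (fun i => i ^ 2) := by
  induction arr generalizing acc with
  | nil => simp
  | cons x xs ih => simp [List.foldl, ih, List.append_assoc]

-- ===== VERDICT (by name: the statement is the Claim_ definition above) =====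
theorem foo_spec : Claim_equal_foo := by
  intro arr _
  unfold Spec_foo foo foo_alt
  rw [pv_foldl_append_sq, List.nil_append]
  apply PySem.List.sorted_id_eq_of_perm_of_pairwise
  · exact ((PySem.List.sorted_perm arr (fun x => |x|) false).map _)
  · refine List.Pairwise.map _ (fun a b (h : |a| ≤ |b|) => ?_)
      (PySem.List.sorted_pairwise arr (fun x => |x|))
    calc a ^ 2 = |a| ^ 2 := (sq_abs a).symm
      _ ≤ |b| ^ 2 := by exact pow_le_pow_left₀ (abs_nonneg a) h 2
      _ = b ^ 2 := sq_abs b
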